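-- pv_equiv track=rewrite | github.com/gaboza12/we-are-algorithm | 724thomas/Week4 Tree/2250.py | solution
-- ===== SOURCE A (Python) =====
-- def solution(n, nodes):
--     tree = [[-1, -1, -1] for x in range(n + 1)]
--     for node, left_child, right_child in nodes:
--         if left_child != -1:
--             tree[node][1] = left_child
--             tree[left_child][0] = node
--         if right_child != -1:
--             tree[node][2] = right_child
--             tree[right_child][0] = node
--
--     root = -1
--     for i in range(1, n + 1):
--         if tree[i][0] == -1:
--             root = i
--             break
--
--     col = [1]
--     level_min = {}
--     level_max = {}
--
--     def dfs(node, level):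
--         if node == -1:
--             return
--
--         dfs(tree[node][1], level + 1)
--
--         if level not in level_min:
--             level_min[level] = col[0]
--         level_max[level] = col[0]
--         col[0] += 1
--
--         dfs(tree[node][2], level + 1)
--
--     dfs(root, 1)
--
--     max_width = 0
--     best_level = 0
--     for level in range(1, max(level_max.keys()) + 1):
--         width = level_max[level] - level_min[level] + 1
--         if width > max_width:
--             max_width = width
--             best_level = level
--
--     return best_level, max_width
-- ===== SOURCE B (Python) =====
-- def solution(n, nodes):
--     left = {}
--     right = {}
--     children = set()
--     for node, l, r in nodes:
--         if l != -1:
--             left[node] = l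
--             children.add(l)
--         if r != -1:
--             right[node] = r
--             children.add(r)
--     root = next((i for i in range(1, n + 1) if i not in children), -1)
--
--     def inorder(node, level):
--         if node == -1:
--             return []
--         return (inorder(left.get(node, -1), level + 1)
--                 + [level]
--                 + inorder(right.get(node, -1), level + 1))
--
--     levels = inorder(root, 1)
--     first = {}
--     last = {}
--     col = 1
--     for lv in levels:
--         if lv not in first:
--             first[lv] = col
--         last[lv] = col
--         col += 1
--     best_level, max_width = 0, 0
--     for lv in range(1, max(last) + 1):
--         width = last[lv] - first[lv] + 1
--         if width > max_width:
--             max_width = width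
--             best_level = lv
--     return best_level, max_width
-- ===== Notes on version B (the rewrite author's own statement) =====
-- stated objective: alternative
-- what changed: B replaces A's mutable index-array tree, stateful recursive dfs with a shared column counter, and dict mutation inside the recursion by child dictionaries plus a pure inorder traversal that returns the list of levels, from which first/last columns per level are computed in a separate enumeration pass.
-- outside the precondition, e.g. on solution(3, [[1, -3, 3], [2, -1, -1], [3, -1, -1]]): A returns (1, 1), B returns (2, 3)
import Mathlib
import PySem

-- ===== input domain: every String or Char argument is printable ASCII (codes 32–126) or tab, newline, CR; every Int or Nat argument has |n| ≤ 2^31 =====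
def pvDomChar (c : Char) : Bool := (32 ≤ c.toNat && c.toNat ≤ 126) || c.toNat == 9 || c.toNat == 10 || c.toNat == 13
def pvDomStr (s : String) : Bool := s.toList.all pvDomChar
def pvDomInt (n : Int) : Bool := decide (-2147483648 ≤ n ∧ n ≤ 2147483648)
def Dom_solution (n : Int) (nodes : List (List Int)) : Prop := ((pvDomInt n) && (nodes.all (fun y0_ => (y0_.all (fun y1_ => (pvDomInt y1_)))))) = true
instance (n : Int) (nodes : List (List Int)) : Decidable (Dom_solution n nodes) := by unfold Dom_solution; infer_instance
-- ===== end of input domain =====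

-- B replaces A's index-array tree + stateful recursive dfs by child dictionaries and a pure
-- inorder level-list, computing columns in a separate enumeration pass (objective: alternative
-- decomposition, not speed). Equal return values on Pre_; neither version mutates its arguments.

-- ===== PORT A =====

-- tree[i][j] = v  (Python index semantics via pyGet?/pySetD; the none case is an IndexError,
-- outside Pre_)
def setCell (t : List (List Int)) (i : Int) (j : Nat) (v : Int) : List (List Int) :=
  match PySem.List.pyGet? t i with
  | none => t
  | some row => PySem.List.pySetD t i (row.set j v)

-- tree[i][j]  (defaults are unreachable under Pre_)
def getCell (t : List (List Int)) (i : Int) (j : Nat) : Int :=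
  match PySem.List.pyGet? t i with
  | none => 0
  | some row => row.getD j 0

-- the 'for node, left_child, right_child in nodes' build loop (a row of length ≠ 3 is a
-- Python unpacking error, outside Pre_)
def buildA (t0 : List (List Int)) (nodes : List (List Int)) : List (List Int) :=
  nodes.foldl (fun t r =>
    match r with
    | [node, lc, rc] =>
      let t1 := if lc ≠ -1 then setCell (setCell t node 1 lc) lc 0 node else t
      let t2 := if rc ≠ -1 then setCell (setCell t1 node 2 rc) rc 0 node else t1
      t2
    | _ => t) t0

-- the root-finding loop with break
def rootLoopA (t : List (List Int)) : List Int → Int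
  | [] => -1
  | i :: rest => if getCell t i 0 = -1 then i else rootLoopA t rest

-- dfs with state (col, level_min, level_max); fuel bounds the recursion depth (n+2 is enough
-- on every input Pre_ admits, where Python's unbounded recursion terminates)
def dfsA (t : List (List Int)) :
    Nat → Int → Int → Int × PySem.Dict Int Int × PySem.Dict Int Int →
    Int × PySem.Dict Int Int × PySem.Dict Int Int
  | 0, _, _, s => s
  | fuel+1, node, level, s =>
    if node = -1 then s
    else
      let s1 := dfsA t fuel (getCell t node 1) (level + 1) s
      let s2 := (s1.1 + 1, s1.2.1.setdefault level s1.1, s1.2.2.insert level s1.1)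
      dfsA t fuel (getCell t node 2) (level + 1) s2

def solution (n : Int) (nodes : List (List Int)) : Int × Int :=
  let t := buildA ((List.range (n+1).toNat).map (fun _ => [-1, -1, -1])) nodes
  let root := rootLoopA t (PySem.List.pyRange 1 (n+1) 1)
  let st := dfsA t (n.toNat + 2) root 1 (1, PySem.Dict.empty, PySem.Dict.empty)
  match PySem.List.max? st.2.2.keys id with
  | none => (0, 0)   -- Python raises ValueError (max of empty) here; outside Pre_
  | some m =>
    let res := (PySem.List.pyRange 1 (m+1) 1).foldl
      (fun acc level =>
        let w := st.2.2.getD level 0 - st.2.1.getD level 0 + 1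
        if w > acc.1 then (w, level) else acc) ((0 : Int), (0 : Int))
    (res.2, res.1)

-- ===== PORT B =====

-- build left/right child dicts and the set of ids that have a parent
def buildB (nodes : List (List Int)) :
    PySem.Dict Int Int × PySem.Dict Int Int × PySem.Set Int :=
  nodes.foldl (fun acc r =>
    match r with
    | [node, lc, rc] =>
      let a1 := if lc ≠ -1 then (acc.1.insert node lc, acc.2.1, PySem.Set.add acc.2.2 lc)
                else acc
      let a2 := if rc ≠ -1 then (a1.1, a1.2.1.insert node rc, PySem.Set.add a1.2.2 rc)
                else a1
      a2
    | _ => acc) (PySem.Dict.empty, PySem.Dict.empty, PySem.Set.empty)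

-- next((i for i in range(1, n+1) if i not in children), -1)
def rootLoopB (ch : PySem.Set Int) : List Int → Int
  | [] => -1
  | i :: rest => if PySem.Set.contains ch i then rootLoopB ch rest else i

-- pure inorder list of levels (fuel as in dfsA)
def inorderB (lt rt : PySem.Dict Int Int) : Nat → Int → Int → List Int
  | 0, _, _ => []
  | fuel+1, node, level =>
    if node = -1 then []
    else
      inorderB lt rt fuel (lt.getD node (-1)) (level + 1)
        ++ [level]
        ++ inorderB lt rt fuel (rt.getD node (-1)) (level + 1)

def solution_alt (n : Int) (nodes : List (List Int)) : Int × Int :=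
  let bs := buildB nodes
  let root := rootLoopB bs.2.2 (PySem.List.pyRange 1 (n+1) 1)
  let levels := inorderB bs.1 bs.2.1 (n.toNat + 2) root 1
  let st := levels.foldl
    (fun s1 lv => (s1.1 + 1, s1.2.1.setdefault lv s1.1, s1.2.2.insert lv s1.1))
    ((1 : Int), PySem.Dict.empty, PySem.Dict.empty)
  match PySem.List.max? st.2.2.keys id with
  | none => (0, 0)   -- Python raises ValueError here; outside Pre_
  | some m =>
    let res := (PySem.List.pyRange 1 (m+1) 1).foldl
      (fun acc level =>
        let w := st.2.2.getD level 0 - st.2.1.getD level 0 + 1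
        if w > acc.1 then (w, level) else acc) ((0 : Int), (0 : Int))
    (res.2, res.1)

-- ===== PRECONDITION & SPEC =====

-- a child slot is either empty (-1) or an in-range id
def ChildOK (n x : Int) : Prop := x = -1 ∨ (0 ≤ x ∧ x ≤ n)

-- all non-empty child entries, in order
def childrenOf (nodes : List (List Int)) : List Int :=
  nodes.flatMap (fun r =>
    (if r.getD 1 0 ≠ -1 then [r.getD 1 0] else [])
      ++ (if r.getD 2 0 ≠ -1 then [r.getD 2 0] else []))

-- the final (last assignment wins, like A's overwrites) child pointer of id i in slot j
def childSlot (nodes : List (List Int)) (j : Nat) (i : Int) : Int :=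
  nodes.foldl (fun v r => if r.headD 0 = i ∧ r.getD j 0 ≠ -1 then r.getD j 0 else v) (-1)

-- one expansion step of a reachable set along the child pointers
def growReach (nodes : List (List Int)) (s : PySem.Set Int) : PySem.Set Int :=
  s.foldl (fun acc i =>
    PySem.Set.add (PySem.Set.add acc (childSlot nodes 1 i)) (childSlot nodes 2 i)) s

-- ids reachable from i in at least one step; expansions saturate after as many steps as
-- there are child entries (all reachable ids are child entries), keeping this cheap to decide
def reachStrict (nodes : List (List Int)) (i : Int) : PySem.Set Int :=
  (growReach nodes)^[(childrenOf nodes).length + 2]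
    (PySem.Set.add (PySem.Set.add PySem.Set.empty (childSlot nodes 1 i)) (childSlot nodes 2 i))

-- the first id in 1..n that is nobody's child (A's root), or -1; by pigeonhole that id is
-- at most (number of child entries) + 1, so the scanned range can be capped there
def rootIdx (n : Int) (nodes : List (List Int)) : Int :=
  ((PySem.List.pyRange 1 (min (n+1) ((childrenOf nodes).length + 2)) 1).find?
    (fun i => decide (i ∉ childrenOf nodes))).getD (-1)

def reachRoot (n : Int) (nodes : List (List Int)) : PySem.Set Int :=
  (growReach nodes)^[(childrenOf nodes).length + 2] (PySem.Set.add PySem.Set.empty (rootIdx n nodes))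

-- Pre_ is the natural domain: rows of three ints; an id must lie in 0..n whenever its row
-- assigns a child, child entries are -1 or in 0..n; some id in 1..n is parentless (else A's
-- final max() raises ValueError); and no id reachable from the root lies on a pointer cycle
-- (else A's recursion never terminates). Outside it Python A raises (IndexError / unpacking
-- error / ValueError / RecursionError) or, on negative indices, silently wraps them
-- Python-style — an accident of A's array indexing that B's dictionaries do not share.
def Pre_solution (n : Int) (nodes : List (List Int)) : Prop :=
  1 ≤ n ∧
  (∀ r ∈ nodes, r.length = 3 ∧
      ((r.getD 1 0 ≠ -1 ∨ r.getD 2 0 ≠ -1) → 0 ≤ r.headD 0 ∧ r.headD 0 ≤ n) ∧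
      ChildOK n (r.getD 1 0) ∧ ChildOK n (r.getD 2 0)) ∧
  (∀ i ∈ reachRoot n nodes, i ≠ -1 → i ∉ reachStrict nodes i) ∧
  (∃ i ∈ PySem.List.pyRange 1 (min (n+1) ((childrenOf nodes).length + 2)) 1,
      i ∉ childrenOf nodes)

instance (n : Int) (nodes : List (List Int)) : Decidable (Pre_solution n nodes) := by
  unfold Pre_solution ChildOK; infer_instance

def pvWitness_solution : Int × List (List Int) := (3, [[1, 2, 3], [2, -1, -1], [3, -1, -1]])

def Spec_solution (n : Int) (nodes : List (List Int)) (out : Int × Int) : Prop := out = solution_alt n nodes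
instance (n : Int) (nodes : List (List Int)) (out : Int × Int) : Decidable (Spec_solution n nodes out) := by unfold Spec_solution; infer_instance

-- ===== CLAIM (what is proved, stated in full; the proofs are below) =====
def Claim_equal_solution : Prop := ∀ (n : Int) (nodes : List (List Int)), Dom_solution n nodes → Pre_solution n nodes → Spec_solution n nodes (solution n nodes)

-- ===== LEMMAS AND PROOFS =====


-- helper: a length-3 list destructs
lemma pv_len3 (r : List Int) (h : r.length = 3) : ∃ a b c, r = [a, b, c] := by
  rcases r with _ | ⟨a, _ | ⟨b, _ | ⟨c, _ | _⟩⟩⟩ <;> simp_all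

lemma pv_length_setCell (t : List (List Int)) (i : Int) (j : Nat) (v : Int) :
    (setCell t i j v).length = t.length := by
  unfold setCell
  cases h : PySem.List.pyGet? t i with
  | none => rfl
  | some row => simp [PySem.List.length_pySetD]

lemma pv_rows3_setCell (t : List (List Int)) (i : Int) (j : Nat) (v : Int)
    (h0 : 0 ≤ i) (h : ∀ row ∈ t, row.length = 3) :
    ∀ row ∈ setCell t i j v, row.length = 3 := by
  unfold setCell
  cases hg : PySem.List.pyGet? t i with
  | none => exact h
  | some row =>
    have hrow : row ∈ t := PySem.List.mem_of_pyGet?_eq_some t hg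
    intro row' hrow'
    have hrw : row' ∈ PySem.List.pySetD t i (row.set j v) := hrow'
    rw [PySem.List.pySetD_of_nonneg t _ h0] at hrw
    rcases List.mem_or_eq_of_mem_set hrw with hm | he
    · exact h _ hm
    · subst he; simp [h _ hrow]

lemma pv_getCell_eq (t : List (List Int)) (i : Int) (j : Nat)
    (h0 : 0 ≤ i) (h1 : i < (t.length : Int)) :
    getCell t i j = (t[i.toNat]'(by omega)).getD j 0 := by
  unfold getCell
  rw [PySem.List.pyGet?_of_nonneg t h0, List.getElem?_eq_getElem (by omega)]

lemma pv_setCell_eq (t : List (List Int)) (i : Int) (j : Nat) (v : Int)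
    (h0 : 0 ≤ i) (h1 : i < (t.length : Int)) :
    setCell t i j v = t.set i.toNat ((t[i.toNat]'(by omega)).set j v) := by
  unfold setCell
  rw [PySem.List.pyGet?_of_nonneg t h0, List.getElem?_eq_getElem (by omega)]
  show PySem.List.pySetD t i ((t[i.toNat]'(by omega)).set j v) = _
  rw [PySem.List.pySetD_of_nonneg t _ h0]

lemma pv_getCell_setCell (t : List (List Int)) (i i' : Int) (j j' : Nat) (v : Int)
    (hrows : ∀ row ∈ t, row.length = 3) (hj : j < 3) (_hj' : j' < 3)
    (h0 : 0 ≤ i) (h1 : i < (t.length : Int)) (h0' : 0 ≤ i') (h1' : i' < (t.length : Int)) :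
    getCell (setCell t i j v) i' j' = if i' = i ∧ j' = j then v else getCell t i' j' := by
  have hi : i.toNat < t.length := by omega
  have hi' : i'.toNat < t.length := by omega
  rw [pv_setCell_eq t i j v h0 h1,
    pv_getCell_eq _ i' j' h0' (by simpa using h1'),
    pv_getCell_eq t i' j' h0' h1']
  by_cases hii : i' = i
  · subst hii
    have : i'.toNat = i'.toNat := rfl
    rw [List.getElem_set_self (h := by simpa using hi)]
    have hlen : (t[i'.toNat]'hi').length = 3 := hrows _ (List.getElem_mem hi')
    by_cases hjj : j' = j
    · subst hjj; simp [List.getD_eq_getElem?_getD, hlen, hj]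
    · simp only [hjj, and_false, if_false]
      simp [List.getD_eq_getElem?_getD, List.getElem?_set_ne (fun h => hjj h.symm)]
  · have : i.toNat ≠ i'.toNat := by omega
    rw [List.getElem_set_ne this]
    simp [hii]

-- invariant relating A's tree array with B's dictionaries and child set
def InvRel (n : Int) (t : List (List Int)) (lt rt : PySem.Dict Int Int)
    (ch : PySem.Set Int) : Prop :=
  t.length = (n+1).toNat ∧ (∀ row ∈ t, row.length = 3) ∧
  (∀ i : Int, 0 ≤ i → i ≤ n →
    getCell t i 1 = lt.getD i (-1) ∧ getCell t i 2 = rt.getD i (-1) ∧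
    (getCell t i 0 = -1 ↔ i ∉ ch) ∧
    ChildOK n (lt.getD i (-1)) ∧ ChildOK n (rt.getD i (-1)))

lemma pv_inv_init (n : Int) :
    InvRel n ((List.range (n+1).toNat).map (fun _ => [-1, -1, -1]))
      PySem.Dict.empty PySem.Dict.empty PySem.Set.empty := by
  refine ⟨by simp, ?_, ?_⟩
  · intro row hrow
    rcases List.mem_map.mp hrow with ⟨_, _, rfl⟩; rfl
  · intro i h0 h1
    have hget : ∀ j : Nat, j < 3 →
        getCell ((List.range (n+1).toNat).map (fun _ => ([-1, -1, -1] : List Int))) i j = -1 := by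
      intro j hj
      have h1' : i < (((List.range (n+1).toNat).map (fun _ => ([-1, -1, -1] : List Int))).length : Int) := by
        simp only [List.length_map, List.length_range]; omega
      rw [pv_getCell_eq _ i j h0 h1']
      rw [List.getElem_map]
      rcases j with _ | _ | _ | j
      · rfl
      · rfl
      · rfl
      · omega
    refine ⟨?_, ?_, ?_, ?_, ?_⟩
    · rw [hget 1 (by omega)]; simp [PySem.Dict.getD_empty]
    · rw [hget 2 (by omega)]; simp [PySem.Dict.getD_empty]
    · rw [hget 0 (by omega)]; simp [PySem.Set.empty]
    · simp [PySem.Dict.getD_empty, ChildOK]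
    · simp [PySem.Dict.getD_empty, ChildOK]

lemma pv_inv_left (n node lc : Int) (t : List (List Int)) (lt rt : PySem.Dict Int Int)
    (ch : PySem.Set Int) (h : InvRel n t lt rt ch)
    (hn0 : 0 ≤ node) (hnn : node ≤ n) (hl0 : 0 ≤ lc) (hln : lc ≤ n) :
    InvRel n (setCell (setCell t node 1 lc) lc 0 node)
      (lt.insert node lc) rt (PySem.Set.add ch lc) := by
  obtain ⟨hlen, hrows, hpt⟩ := h
  have hN : (t.length : Int) = n + 1 := by omega
  have hnode1 : node < (t.length : Int) := by omega
  have hlc1 : lc < (t.length : Int) := by omega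
  have hlen1 : (setCell t node 1 lc).length = t.length := pv_length_setCell ..
  have hrows1 : ∀ row ∈ setCell t node 1 lc, row.length = 3 :=
    pv_rows3_setCell t node 1 lc hn0 hrows
  have hg1 : ∀ (i' : Int) (j' : Nat), j' < 3 → 0 ≤ i' → i' ≤ n →
      getCell (setCell (setCell t node 1 lc) lc 0 node) i' j'
        = if i' = lc ∧ j' = 0 then node
          else if i' = node ∧ j' = 1 then lc else getCell t i' j' := by
    intro i' j' hj' h0' h1'
    rw [pv_getCell_setCell _ lc i' 0 j' node hrows1 (by omega) hj' hl0 (by omega) h0' (by omega)]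
    by_cases hc : i' = lc ∧ j' = 0
    · simp [hc]
    · rw [if_neg hc, if_neg hc,
        pv_getCell_setCell t node i' 1 j' lc hrows (by omega) hj' hn0 hnode1 h0' (by omega)]
  refine ⟨by rw [pv_length_setCell, hlen1, hlen], ?_, ?_⟩
  · exact pv_rows3_setCell _ lc 0 node hl0 hrows1
  · intro i h0 h1
    obtain ⟨e1, e2, e3, c1, c2⟩ := hpt i h0 h1
    refine ⟨?_, ?_, ?_, ?_, c2⟩
    · rw [hg1 i 1 (by omega) h0 h1]
      rw [PySem.Dict.getD_insert]
      by_cases hi : i = node <;> simp [hi, e1]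
    · rw [hg1 i 2 (by omega) h0 h1]; simp [e2]
    · rw [hg1 i 0 (by omega) h0 h1]
      by_cases hi : i = lc
      · rw [if_pos ⟨hi, rfl⟩]
        constructor
        · intro he; exfalso; omega
        · intro he; exfalso
          exact he ((PySem.Set.mem_add ch lc i).mpr (Or.inr hi))
      · rw [if_neg (by simp [hi]), if_neg (by simp)]
        rw [e3]
        constructor
        · intro h4 h5
          rcases (PySem.Set.mem_add ch lc i).mp h5 with h6 | h6
          · exact h4 h6
          · exact hi h6
        · intro h4 h5
          exact h4 ((PySem.Set.mem_add ch lc i).mpr (Or.inl h5))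
    · rw [PySem.Dict.getD_insert]
      by_cases hi : i = node
      · rw [if_pos hi]; exact Or.inr ⟨hl0, hln⟩
      · rw [if_neg hi]; exact c1

lemma pv_inv_right (n node rc : Int) (t : List (List Int)) (lt rt : PySem.Dict Int Int)
    (ch : PySem.Set Int) (h : InvRel n t lt rt ch)
    (hn0 : 0 ≤ node) (hnn : node ≤ n) (hr0 : 0 ≤ rc) (hrn : rc ≤ n) :
    InvRel n (setCell (setCell t node 2 rc) rc 0 node)
      lt (rt.insert node rc) (PySem.Set.add ch rc) := by
  obtain ⟨hlen, hrows, hpt⟩ := h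
  have hN : (t.length : Int) = n + 1 := by omega
  have hnode1 : node < (t.length : Int) := by omega
  have hrc1 : rc < (t.length : Int) := by omega
  have hlen1 : (setCell t node 2 rc).length = t.length := pv_length_setCell ..
  have hrows1 : ∀ row ∈ setCell t node 2 rc, row.length = 3 :=
    pv_rows3_setCell t node 2 rc hn0 hrows
  have hg1 : ∀ (i' : Int) (j' : Nat), j' < 3 → 0 ≤ i' → i' ≤ n →
      getCell (setCell (setCell t node 2 rc) rc 0 node) i' j'
        = if i' = rc ∧ j' = 0 then node
          else if i' = node ∧ j' = 2 then rc else getCell t i' j' := by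
    intro i' j' hj' h0' h1'
    rw [pv_getCell_setCell _ rc i' 0 j' node hrows1 (by omega) hj' hr0 (by omega) h0' (by omega)]
    by_cases hc : i' = rc ∧ j' = 0
    · simp [hc]
    · rw [if_neg hc, if_neg hc,
        pv_getCell_setCell t node i' 2 j' rc hrows (by omega) hj' hn0 hnode1 h0' (by omega)]
  refine ⟨by rw [pv_length_setCell, hlen1, hlen], ?_, ?_⟩
  · exact pv_rows3_setCell _ rc 0 node hr0 hrows1
  · intro i h0 h1
    obtain ⟨e1, e2, e3, c1, c2⟩ := hpt i h0 h1
    refine ⟨?_, ?_, ?_, c1, ?_⟩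
    · rw [hg1 i 1 (by omega) h0 h1]; simp [e1]
    · rw [hg1 i 2 (by omega) h0 h1]
      rw [PySem.Dict.getD_insert]
      by_cases hi : i = node <;> simp [hi, e2]
    · rw [hg1 i 0 (by omega) h0 h1]
      by_cases hi : i = rc
      · rw [if_pos ⟨hi, rfl⟩]
        constructor
        · intro he; exfalso; omega
        · intro he; exfalso
          exact he ((PySem.Set.mem_add ch rc i).mpr (Or.inr hi))
      · rw [if_neg (by simp [hi]), if_neg (by simp)]
        rw [e3]
        constructor
        · intro h4 h5
          rcases (PySem.Set.mem_add ch rc i).mp h5 with h6 | h6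
          · exact h4 h6
          · exact hi h6
        · intro h4 h5
          exact h4 ((PySem.Set.mem_add ch rc i).mpr (Or.inl h5))
    · rw [PySem.Dict.getD_insert]
      by_cases hi : i = node
      · rw [if_pos hi]; exact Or.inr ⟨hr0, hrn⟩
      · rw [if_neg hi]; exact c2

-- the build loops preserve the invariant in lockstep
lemma pv_build_gen (n : Int) :
    ∀ (nodes : List (List Int)) (t : List (List Int))
      (acc : PySem.Dict Int Int × PySem.Dict Int Int × PySem.Set Int),
    (∀ r ∈ nodes, r.length = 3 ∧
        ((r.getD 1 0 ≠ -1 ∨ r.getD 2 0 ≠ -1) → 0 ≤ r.headD 0 ∧ r.headD 0 ≤ n) ∧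
        ChildOK n (r.getD 1 0) ∧ ChildOK n (r.getD 2 0)) →
    InvRel n t acc.1 acc.2.1 acc.2.2 →
    InvRel n (buildA t nodes)
      (nodes.foldl (fun acc r =>
        match r with
        | [node, lc, rc] =>
          let a1 := if lc ≠ -1 then (acc.1.insert node lc, acc.2.1, PySem.Set.add acc.2.2 lc)
                    else acc
          let a2 := if rc ≠ -1 then (a1.1, a1.2.1.insert node rc, PySem.Set.add a1.2.2 rc)
                    else a1
          a2
        | _ => acc) acc).1
      (nodes.foldl (fun acc r =>
        match r with
        | [node, lc, rc] =>
          let a1 := if lc ≠ -1 then (acc.1.insert node lc, acc.2.1, PySem.Set.add acc.2.2 lc)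
                    else acc
          let a2 := if rc ≠ -1 then (a1.1, a1.2.1.insert node rc, PySem.Set.add a1.2.2 rc)
                    else a1
          a2
        | _ => acc) acc).2.1
      (nodes.foldl (fun acc r =>
        match r with
        | [node, lc, rc] =>
          let a1 := if lc ≠ -1 then (acc.1.insert node lc, acc.2.1, PySem.Set.add acc.2.2 lc)
                    else acc
          let a2 := if rc ≠ -1 then (a1.1, a1.2.1.insert node rc, PySem.Set.add a1.2.2 rc)
                    else a1
          a2
        | _ => acc) acc).2.2 := by
  intro nodes
  induction nodes with
  | nil => intro t acc _ h; simpa [buildA] using h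
  | cons r rest ih =>
    intro t acc hrows h
    obtain ⟨hr, hrest⟩ := List.forall_mem_cons.mp hrows
    obtain ⟨a, b, c, rfl⟩ := pv_len3 r hr.1
    obtain ⟨_, hid, hb, hc⟩ := hr
    simp only [List.headD, List.getD] at hid hb hc
    simp only [buildA, List.foldl_cons] at *
    apply ih _ _ hrest
    -- one row step
    by_cases hlb : b = -1 <;> by_cases hrc : c = -1
    · simpa [hlb, hrc] using h
    · have ha := hid (Or.inr hrc)
      have hc' : 0 ≤ c ∧ c ≤ n := by rcases hc with h' | h'; exact absurd h' hrc; exact h'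
      simpa [hlb, hrc] using pv_inv_right n a c t acc.1 acc.2.1 acc.2.2 h ha.1 ha.2 hc'.1 hc'.2
    · have ha := hid (Or.inl hlb)
      have hb' : 0 ≤ b ∧ b ≤ n := by rcases hb with h' | h'; exact absurd h' hlb; exact h'
      simpa [hlb, hrc] using pv_inv_left n a b t acc.1 acc.2.1 acc.2.2 h ha.1 ha.2 hb'.1 hb'.2
    · have ha := hid (Or.inl hlb)
      have hb' : 0 ≤ b ∧ b ≤ n := by rcases hb with h' | h'; exact absurd h' hlb; exact h'
      have hc' : 0 ≤ c ∧ c ≤ n := by rcases hc with h' | h'; exact absurd h' hrc; exact h'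
      have h1 := pv_inv_left n a b t acc.1 acc.2.1 acc.2.2 h ha.1 ha.2 hb'.1 hb'.2
      have h2 := pv_inv_right n a c _ _ _ _ h1 ha.1 ha.2 hc'.1 hc'.2
      simpa [hlb, hrc] using h2

lemma pv_root_eq (t : List (List Int)) (ch : PySem.Set Int) :
    ∀ L : List Int, (∀ i ∈ L, (getCell t i 0 = -1 ↔ i ∉ ch)) →
    rootLoopA t L = rootLoopB ch L := by
  intro L
  induction L with
  | nil => intro _; rfl
  | cons i rest ih =>
    intro h
    have hi := h i (List.mem_cons_self ..)
    simp only [rootLoopA, rootLoopB]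
    by_cases hm : i ∈ ch
    · have : getCell t i 0 ≠ -1 := fun he => (hi.mp he) hm
      rw [if_neg this, if_pos (by simpa [PySem.Set.contains_iff] using hm)]
      exact ih (fun j hj => h j (List.mem_cons_of_mem _ hj))
    · rw [if_pos (hi.mpr hm), if_neg (by simpa [PySem.Set.contains_iff] using hm)]

lemma pv_root_ok (n : Int) (t : List (List Int)) :
    ∀ L : List Int, (∀ i ∈ L, 0 ≤ i ∧ i ≤ n) → ChildOK n (rootLoopA t L) := by
  intro L
  induction L with
  | nil => intro _; exact Or.inl rfl
  | cons i rest ih =>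
    intro h
    simp only [rootLoopA]
    split_ifs
    · exact Or.inr (h i (List.mem_cons_self ..))
    · exact ih (fun j hj => h j (List.mem_cons_of_mem _ hj))

-- A's stateful dfs is B's pure inorder level list folded through the visit update
lemma pv_dfs_fold (n : Int) (t : List (List Int)) (lt rt : PySem.Dict Int Int)
    (hag : ∀ i : Int, 0 ≤ i → i ≤ n →
      getCell t i 1 = lt.getD i (-1) ∧ getCell t i 2 = rt.getD i (-1))
    (hcl : ∀ i : Int, 0 ≤ i → i ≤ n →
      ChildOK n (lt.getD i (-1)) ∧ ChildOK n (rt.getD i (-1))) :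
    ∀ (f : Nat) (node level : Int)
      (s : Int × PySem.Dict Int Int × PySem.Dict Int Int), ChildOK n node →
      dfsA t f node level s
        = (inorderB lt rt f node level).foldl
            (fun s1 lv => (s1.1 + 1, s1.2.1.setdefault lv s1.1, s1.2.2.insert lv s1.1)) s := by
  intro f
  induction f with
  | zero => intro node level s _; simp [dfsA, inorderB]
  | succ f ih =>
    intro node level s hnode
    by_cases hn1 : node = -1
    · simp [dfsA, inorderB, hn1]
    · have hb : 0 ≤ node ∧ node ≤ n := by
        rcases hnode with h' | h'; exact absurd h' hn1; exact h'
      obtain ⟨e1, e2⟩ := hag node hb.1 hb.2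
      obtain ⟨c1, c2⟩ := hcl node hb.1 hb.2
      simp only [dfsA, inorderB, if_neg hn1]
      rw [e1, e2, List.foldl_append, List.foldl_append, List.foldl_cons, List.foldl_nil]
      rw [ih _ _ s c1, ih _ _ _ c2]

-- the two ports compute the same pair whenever the rows are well-formed
lemma pv_main (n : Int) (nodes : List (List Int))
    (hrows : ∀ r ∈ nodes, r.length = 3 ∧
        ((r.getD 1 0 ≠ -1 ∨ r.getD 2 0 ≠ -1) → 0 ≤ r.headD 0 ∧ r.headD 0 ≤ n) ∧
        ChildOK n (r.getD 1 0) ∧ ChildOK n (r.getD 2 0)) :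
    solution n nodes = solution_alt n nodes := by
  have hinv := pv_build_gen n nodes
    ((List.range (n+1).toNat).map (fun _ => [-1, -1, -1]))
    (PySem.Dict.empty, PySem.Dict.empty, PySem.Set.empty) hrows (pv_inv_init n)
  have hfold : (buildB nodes) = nodes.foldl (fun acc r =>
        match r with
        | [node, lc, rc] =>
          let a1 := if lc ≠ -1 then (acc.1.insert node lc, acc.2.1, PySem.Set.add acc.2.2 lc)
                    else acc
          let a2 := if rc ≠ -1 then (a1.1, a1.2.1.insert node rc, PySem.Set.add a1.2.2 rc)
                    else a1
          a2
        | _ => acc) (PySem.Dict.empty, PySem.Dict.empty, PySem.Set.empty) := rfl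
  rw [← hfold] at hinv
  set t := buildA ((List.range (n+1).toNat).map (fun _ => [-1, -1, -1])) nodes with ht
  set lt := (buildB nodes).1 with hlt
  set rt := (buildB nodes).2.1 with hrt
  set ch := (buildB nodes).2.2 with hch
  obtain ⟨hlen, hrows3, hpt⟩ := hinv
  have hmem : ∀ i ∈ PySem.List.pyRange 1 (n+1) 1, 0 ≤ i ∧ i ≤ n := by
    intro i hi
    have := (PySem.List.mem_pyRange_one).mp hi
    omega
  have hrootEq : rootLoopA t (PySem.List.pyRange 1 (n+1) 1)
      = rootLoopB ch (PySem.List.pyRange 1 (n+1) 1) := by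
    apply pv_root_eq
    intro i hi
    exact (hpt i (hmem i hi).1 (hmem i hi).2).2.2.1
  have hrootOK : ChildOK n (rootLoopA t (PySem.List.pyRange 1 (n+1) 1)) :=
    pv_root_ok n t _ hmem
  have hst : dfsA t (n.toNat + 2) (rootLoopA t (PySem.List.pyRange 1 (n+1) 1)) 1
        ((1 : Int), PySem.Dict.empty, PySem.Dict.empty)
      = (inorderB lt rt (n.toNat + 2) (rootLoopB ch (PySem.List.pyRange 1 (n+1) 1)) 1).foldl
          (fun s1 lv => (s1.1 + 1, s1.2.1.setdefault lv s1.1, s1.2.2.insert lv s1.1))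
          ((1 : Int), PySem.Dict.empty, PySem.Dict.empty) := by
    rw [← hrootEq]
    exact pv_dfs_fold n t lt rt
      (fun i h0 h1 => ⟨(hpt i h0 h1).1, (hpt i h0 h1).2.1⟩)
      (fun i h0 h1 => ⟨(hpt i h0 h1).2.2.2.1, (hpt i h0 h1).2.2.2.2⟩)
      _ _ _ _ hrootOK
  show solution n nodes = solution_alt n nodes
  simp only [solution, solution_alt, ← ht, ← hlt, ← hrt, ← hch]
  rw [hst]


-- ===== VERDICT (by name: the statement is the Claim_ definition above) =====
theorem solution_spec : Claim_equal_solution := by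
  intro n nodes _ hPre
  unfold Spec_solution
  exact pv_main n nodes hPre.2.1
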